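-- pv_equiv track=rewrite | github.com/DanerSound/tdd_step_by_step | listsLens.py | listsLens
-- ===== SOURCE A (Python) =====
-- def valid_array(list_check):
--     valid = True
--     for element in list_check:
--         if type(element) not in [str]:
--             valid = False
--             return valid
--
--     return valid
--
-- def listsLens(list_to_compare):
--     lens=[]
--
--     if len(list_to_compare)==0:
--         lens.append(len(list_to_compare))
--         return lens
--
--     if valid_array(list_to_compare):
--         for item in list_to_compare:
--             lens.append(len(item))
--     else:
--         raise TypeError(" List must contain non string elements!")
--
--     return lens
-- ===== SOURCE B (Python) =====
-- def listsLens(list_to_compare):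
--     if not list_to_compare:
--         return [0]
--     lens = []
--     for item in list_to_compare:
--         if type(item) is not str:
--             raise TypeError(" List must contain non string elements!")
--         lens.append(len(item))
--     return lens
-- ===== Notes on version B (the rewrite author's own statement) =====
-- stated objective: simpler
-- what changed: Dropped the separate valid_array pre-validation pass; B guards the empty case and then does a single fused loop that type-checks each element and appends its length (raising the identical TypeError on the first non-string), instead of A's validate-all pass followed by a second length pass.
import Mathlib
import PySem

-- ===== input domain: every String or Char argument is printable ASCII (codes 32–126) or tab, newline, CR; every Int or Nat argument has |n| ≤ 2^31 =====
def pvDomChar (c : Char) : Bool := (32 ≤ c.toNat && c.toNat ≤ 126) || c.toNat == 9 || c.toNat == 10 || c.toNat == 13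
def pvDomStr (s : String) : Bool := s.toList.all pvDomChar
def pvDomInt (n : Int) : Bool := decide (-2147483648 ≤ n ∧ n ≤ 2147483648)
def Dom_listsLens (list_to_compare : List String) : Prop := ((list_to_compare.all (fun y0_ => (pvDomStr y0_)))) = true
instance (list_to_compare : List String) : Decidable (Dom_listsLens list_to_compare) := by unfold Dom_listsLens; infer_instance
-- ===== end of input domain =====

-- B drops A's separate valid_array pre-validation pass and fuses type check and
-- length collection into one loop (simpler, one pass instead of two); return values agree.

-- ===== PORT A =====
-- valid_array: for each element, `type(element) not in [str]` — statically false for String,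
-- so the early-return-False branch is unreachable; the loop just walks the list.
def valid_array : List String → Bool
  | [] => true
  | _ :: rest => valid_array rest

def listsLens (list_to_compare : List String) : List Int :=
  let lens : List Int := []
  if list_to_compare.length = 0 then
    lens ++ [(list_to_compare.length : Int)]
  else if valid_array list_to_compare then
    list_to_compare.foldl (fun lens item => lens ++ [PySem.Str.len item]) lens
  else
    []  -- Python raises TypeError here; unreachable for List String (valid_array is always true)

-- ===== PORT B =====
-- fused loop: `type(item) is not str` is statically false for String, so the raise
-- branch is unreachable; the loop appends len(item) to the accumulator lens.
def listsLens_alt_go (lens : List Int) : List String → List Int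
  | [] => lens
  | item :: rest => listsLens_alt_go (lens ++ [PySem.Str.len item]) rest

def listsLens_alt (list_to_compare : List String) : List Int :=
  match list_to_compare with
  | [] => [0]
  | _ => listsLens_alt_go [] list_to_compare

-- ===== PRECONDITION & SPEC =====
def Spec_listsLens (list_to_compare : List String) (out : List Int) : Prop := out = listsLens_alt list_to_compare
instance (list_to_compare : List String) (out : List Int) : Decidable (Spec_listsLens list_to_compare out) := by unfold Spec_listsLens; infer_instance

-- ===== CLAIM (what is proved, stated in full; the proofs are below) =====
def Claim_equal_listsLens : Prop := ∀ (list_to_compare : List String), Dom_listsLens list_to_compare → Spec_listsLens list_to_compare (listsLens list_to_compare)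

-- ===== LEMMAS AND PROOFS =====
theorem valid_array_true (l : List String) : valid_array l = true := by
  induction l with
  | nil => rfl
  | cons _ _ ih => simpa [valid_array] using ih

theorem go_eq_foldl (l : List String) (acc : List Int) :
    listsLens_alt_go acc l = l.foldl (fun lens item => lens ++ [PySem.Str.len item]) acc := by
  induction l generalizing acc with
  | nil => rfl
  | cons x xs ih => simp [listsLens_alt_go, List.foldl, ih]

-- ===== VERDICT (by name: the statement is the Claim_ definition above) =====
theorem listsLens_spec : Claim_equal_listsLens := by
  intro l _
  unfold Spec_listsLens listsLens listsLens_alt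
  cases l with
  | nil => rfl
  | cons x xs => simp [valid_array_true, go_eq_foldl]
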